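-- pv_equiv track=rewrite | github.com/ThomasCZhang/CMU-02604-Bioinformatics-Spring2023 | Week10 (Suffix Trees)/LCS.py | FindDeepestInternalNode
-- ===== SOURCE A (Python) =====
-- def FindDeepestInternalNode(
--     tree: dict[int, list[int]], current_path: list[int], current_depth: int
-- ) -> tuple[list[int], int]:
--     """
--     Recursively finds the deepest internal node in a suffix tree.
--     Input:
--         tree: The suffix tree.
--         current_path: the path to the current node.
--         best_depth: The depth of the deepest internal node found so far.
--     Output:
--         The path taken to the deepest internal node.
--     """
--     current_node = current_path[-1]
--     best_path, best_depth = current_path, current_depth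
--
--     for edge in tree[current_node]:
--         child_node = edge[0]
--         if len(tree[child_node]) > 0: # If child node is not a leaf
--             new_path, new_depth = FindDeepestInternalNode(
--                 tree, [*current_path, child_node], current_depth + edge[2]
--             )
--             if new_depth > best_depth:
--                 best_depth = new_depth
--                 best_path = new_path
--
--     return best_path, best_depth
-- ===== SOURCE B (Python) =====
-- def FindDeepestInternalNode(tree, current_path, current_depth):
--     """Iterative DFS with an explicit stack instead of recursion: pop a frame,
--     keep it if strictly deeper than the best so far (so the first node in
--     preorder wins ties), and push the internal children in reverse so they are
--     popped in the original left-to-right order."""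
--     stack = [(current_path, current_depth)]
--     best_path, best_depth = current_path, current_depth
--     while stack:
--         path, depth = stack.pop()
--         if depth > best_depth:
--             best_path, best_depth = path, depth
--         for edge in reversed(tree[path[-1]]):
--             child = edge[0]
--             if len(tree[child]) > 0:
--                 stack.append((path + [child], depth + edge[2]))
--     return best_path, best_depth
-- ===== Notes on version B (the rewrite author's own statement) =====
-- stated objective: alternative
-- what changed: A is a recursive DFS that folds each child's recursive result into a running best; B replaces the recursion by an iterative traversal with an explicit stack of (path, depth) frames, pushing internal children in reverse so frames pop in preorder, and keeps the first strictly-deeper frame seen.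
import Mathlib
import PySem

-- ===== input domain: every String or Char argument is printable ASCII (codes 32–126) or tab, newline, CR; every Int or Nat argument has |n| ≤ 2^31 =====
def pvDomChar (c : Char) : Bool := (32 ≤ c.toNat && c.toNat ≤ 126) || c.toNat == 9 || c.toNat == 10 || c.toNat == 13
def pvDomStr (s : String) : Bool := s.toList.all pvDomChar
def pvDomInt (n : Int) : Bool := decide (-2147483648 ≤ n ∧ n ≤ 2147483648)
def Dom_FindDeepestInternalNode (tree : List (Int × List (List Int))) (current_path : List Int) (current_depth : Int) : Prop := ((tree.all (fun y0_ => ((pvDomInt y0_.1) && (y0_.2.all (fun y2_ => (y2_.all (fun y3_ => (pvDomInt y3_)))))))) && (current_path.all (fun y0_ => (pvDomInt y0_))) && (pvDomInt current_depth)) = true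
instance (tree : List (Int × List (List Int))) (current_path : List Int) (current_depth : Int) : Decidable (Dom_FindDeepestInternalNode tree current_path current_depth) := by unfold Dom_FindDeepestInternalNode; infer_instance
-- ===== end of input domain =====

-- B replaces A's recursive DFS by an iterative explicit-stack traversal (internal children
-- pushed in reverse so frames pop in preorder; first strictly deeper frame wins).

-- ===== PORT A =====
-- A's recursion, fueled for totality: fuel bounds the recursion depth; under Pre_ the
-- reachable part is acyclic, so depth ≤ tree.length and fuel tree.length+1 is never exhausted.
def pvGoA (tree : List (Int × List (List Int))) : Nat → List Int → Int → List Int × Int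
  | 0, path, d => (path, d)
  | n+1, path, d =>
    let current_node := (PySem.List.pyGet? path (-1)).getD 0
    let edges := (List.lookup current_node tree).getD []
    edges.foldl (fun b edge =>
      let child_node := (PySem.List.pyGet? edge 0).getD 0
      if ((List.lookup child_node tree).getD []).length > 0 then
        let r := pvGoA tree n (path ++ [child_node]) (d + (PySem.List.pyGet? edge 2).getD 0)
        if r.2 > b.2 then r else b
      else b) (path, d)

def FindDeepestInternalNode (tree : List (Int × List (List Int))) (current_path : List Int) (current_depth : Int) : List Int × Int :=
  pvGoA tree (tree.length + 1) current_path current_depth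

-- ===== PORT B =====
-- The while-loop, fueled by an upper bound on the number of iterations (frames ever popped);
-- under Pre_ the bound (edges+2)^(tree.length+2) is proved sufficient below.
def pvLoopB (tree : List (Int × List (List Int))) : Nat → List (List Int × Int) → List Int × Int → List Int × Int
  | 0, _, best => best
  | n+1, stack, best =>
    match stack with
    | [] => best
    | (path, depth) :: rest =>
      let best' := if depth > best.2 then (path, depth) else best
      let edges := (List.lookup ((PySem.List.pyGet? path (-1)).getD 0) tree).getD []
      let stack' := edges.reverse.foldl (fun st edge =>
        let child := (PySem.List.pyGet? edge 0).getD 0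
        if ((List.lookup child tree).getD []).length > 0 then
          (path ++ [child], depth + (PySem.List.pyGet? edge 2).getD 0) :: st
        else st) rest
      pvLoopB tree n stack' best'

def pvFuelB (tree : List (Int × List (List Int))) : Nat :=
  ((tree.map (fun p => p.2.length)).sum + 2) ^ (tree.length + 2)

def FindDeepestInternalNode_alt (tree : List (Int × List (List Int))) (current_path : List Int) (current_depth : Int) : List Int × Int :=
  pvLoopB tree (pvFuelB tree) [(current_path, current_depth)] (current_path, current_depth)

-- ===== PRECONDITION & SPEC =====
-- helpers for Pre_: the internal (non-leaf) children of a node, and bounded reachability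
-- along them — a shape property of the input graph (which nodes/edges can be reached, and
-- whether a cycle is reachable), not a run of either port: it computes no paths and no depths.
def pvIChildren (tree : List (Int × List (List Int))) (node : Int) : List (Int × Int) :=
  ((List.lookup node tree).getD []).filterMap (fun e =>
    let c := (PySem.List.pyGet? e 0).getD 0
    if ((List.lookup c tree).getD []).length > 0 then some (c, (PySem.List.pyGet? e 2).getD 0) else none)

def pvStep (tree : List (Int × List (List Int))) (s : List Int) : List Int :=
  s.flatMap (fun k => (pvIChildren tree k).map (fun cw => cw.1))

def pvIter (tree : List (Int × List (List Int))) : Nat → List Int → List Int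
  | 0, s => s
  | n+1, s => pvIter tree n (pvStep tree s)

def pvReachSet (tree : List (Int × List (List Int))) (start : Int) : List Int :=
  (List.range (tree.length + 1)).flatMap (fun i => pvIter tree i [start])

-- Pre_ holds exactly when the Python A returns: the path is nonempty (else IndexError), the
-- start node is a key (else KeyError), no cycle is reachable along internal children (else the
-- recursion never ends), and every edge of every reachable node is nonempty with its child a
-- key and, when the child is internal, long enough for edge[2] (else IndexError/KeyError).
def Pre_FindDeepestInternalNode (tree : List (Int × List (List Int))) (current_path : List Int) (current_depth : Int) : Prop :=
  current_path ≠ [] ∧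
  (List.lookup ((PySem.List.pyGet? current_path (-1)).getD 0) tree).isSome = true ∧
  pvIter tree (tree.length + 1) [(PySem.List.pyGet? current_path (-1)).getD 0] = [] ∧
  ∀ k ∈ pvReachSet tree ((PySem.List.pyGet? current_path (-1)).getD 0),
    ∀ e ∈ (List.lookup k tree).getD [],
      e ≠ [] ∧ (List.lookup ((PySem.List.pyGet? e 0).getD 0) tree).isSome = true ∧
      ((List.lookup ((PySem.List.pyGet? e 0).getD 0) tree).getD [] ≠ [] → 3 ≤ e.length)
instance (tree : List (Int × List (List Int))) (current_path : List Int) (current_depth : Int) : Decidable (Pre_FindDeepestInternalNode tree current_path current_depth) := by unfold Pre_FindDeepestInternalNode; infer_instance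

def pvWitness_FindDeepestInternalNode : (List (Int × List (List Int))) × List Int × Int :=
  ([(0, [[1, 0, 3], [2, 0, 1]]), (1, []), (2, [[3, 0, 2]]), (3, [])], [0], 0)

def Spec_FindDeepestInternalNode (tree : List (Int × List (List Int))) (current_path : List Int) (current_depth : Int) (out : List Int × Int) : Prop := out = FindDeepestInternalNode_alt tree current_path current_depth
instance (tree : List (Int × List (List Int))) (current_path : List Int) (current_depth : Int) (out : List Int × Int) : Decidable (Spec_FindDeepestInternalNode tree current_path current_depth out) := by unfold Spec_FindDeepestInternalNode; infer_instance

-- ===== CLAIM =====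
def Claim_equal_FindDeepestInternalNode : Prop := ∀ (tree : List (Int × List (List Int))) (current_path : List Int) (current_depth : Int), Dom_FindDeepestInternalNode tree current_path current_depth → Pre_FindDeepestInternalNode tree current_path current_depth → Spec_FindDeepestInternalNode tree current_path current_depth (FindDeepestInternalNode tree current_path current_depth)

-- ===== LEMMAS AND PROOFS =====

-- 'keep the strictly deeper candidate, earlier wins ties'
def pvPick (b c : List Int × Int) : List Int × Int := if c.2 > b.2 then c else b

theorem pvPick_assoc (b s x : List Int × Int) : pvPick (pvPick b s) x = pvPick b (pvPick s x) := by
  unfold pvPick; split_ifs <;> first | rfl | omega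

theorem pvPick_self (b : List Int × Int) : pvPick b b = b := by
  unfold pvPick; split_ifs <;> rfl

-- A's edge fold rewritten as a pvPick fold over the internal children only
theorem pvGoA_ichildren (tree : List (Int × List (List Int))) (n : Nat) (path : List Int) (d : Int) :
    pvGoA tree (n+1) path d
    = (pvIChildren tree ((PySem.List.pyGet? path (-1)).getD 0)).foldl
        (fun b cw => pvPick b (pvGoA tree n (path ++ [cw.1]) (d + cw.2))) (path, d) := by
  show (((List.lookup ((PySem.List.pyGet? path (-1)).getD 0) tree).getD []).foldl _ _) = _
  unfold pvIChildren
  generalize ((List.lookup ((PySem.List.pyGet? path (-1)).getD 0) tree).getD []) = es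
  suffices h : ∀ (b : List Int × Int),
      es.foldl (fun b edge =>
        let child_node := (PySem.List.pyGet? edge 0).getD 0
        if ((List.lookup child_node tree).getD []).length > 0 then
          let r := pvGoA tree n (path ++ [child_node]) (d + (PySem.List.pyGet? edge 2).getD 0)
          if r.2 > b.2 then r else b
        else b) b
      = (es.filterMap (fun e =>
          let c := (PySem.List.pyGet? e 0).getD 0
          if ((List.lookup c tree).getD []).length > 0 then some (c, (PySem.List.pyGet? e 2).getD 0) else none)).foldl
          (fun b cw => pvPick b (pvGoA tree n (path ++ [cw.1]) (d + cw.2))) b from h (path, d)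
  induction es with
  | nil => intro b; rfl
  | cons e es ih =>
    intro b
    simp only [List.foldl_cons, List.filterMap_cons]
    by_cases h : ((List.lookup ((PySem.List.pyGet? e 0).getD 0) tree).getD []).length > 0
    · simp only [h, if_true, List.foldl_cons]
      exact ih _
    · simp only [h, if_false]
      exact ih b

-- hoisting pvPick out of a pvPick fold
theorem pvFold_pick_hoist {α : Type} (f : α → List Int × Int) :
    ∀ (l : List α) (b s : List Int × Int),
    l.foldl (fun acc x => pvPick acc (f x)) (pvPick b s)
    = pvPick b (l.foldl (fun acc x => pvPick acc (f x)) s)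
  | [], b, s => rfl
  | x :: l, b, s => by
    simp only [List.foldl_cons]
    rw [pvPick_assoc]
    exact pvFold_pick_hoist f l b (pvPick s (f x))

-- the reversed push-fold of port B produces the internal-children frames, in order, on top
theorem pvPush_frames (tree : List (Int × List (List Int))) (path : List Int) (d : Int) :
    ∀ (es : List (List Int)) (st : List (List Int × Int)),
    es.reverse.foldl (fun st edge =>
        let child := (PySem.List.pyGet? edge 0).getD 0
        if ((List.lookup child tree).getD []).length > 0 then
          (path ++ [child], d + (PySem.List.pyGet? edge 2).getD 0) :: st
        else st) st
    = (es.filterMap (fun e =>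
        let c := (PySem.List.pyGet? e 0).getD 0
        if ((List.lookup c tree).getD []).length > 0 then
          some (path ++ [c], d + (PySem.List.pyGet? e 2).getD 0) else none)) ++ st
  | [], st => rfl
  | e :: es, st => by
    simp only [List.reverse_cons, List.foldl_append, List.foldl_cons, List.foldl_nil,
      List.filterMap_cons]
    by_cases h : ((List.lookup ((PySem.List.pyGet? e 0).getD 0) tree).getD []).length > 0
    · simp only [h, if_true]
      rw [pvPush_frames tree path d es]
      rfl
    · simp only [h, if_false]
      rw [pvPush_frames tree path d es]

-- one iteration of port B: pop, update best, push the internal-children frames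
theorem pvLoopB_step (tree : List (Int × List (List Int))) (F : Nat) (path : List Int) (d : Int)
    (rest : List (List Int × Int)) (best : List Int × Int) :
    pvLoopB tree (F+1) ((path, d) :: rest) best
    = pvLoopB tree F
        (((pvIChildren tree ((PySem.List.pyGet? path (-1)).getD 0)).map
            (fun cw => (path ++ [cw.1], d + cw.2))) ++ rest)
        (pvPick best (path, d)) := by
  show pvLoopB tree F _ _ = _
  rw [pvPush_frames]
  congr 1
  unfold pvIChildren
  rw [List.map_filterMap]
  refine congrArg (fun l => l ++ rest) (List.filterMap_congr ?_)
  intro e _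
  by_cases h : ((List.lookup ((PySem.List.pyGet? e 0).getD 0) tree).getD []).length > 0 <;>
    simp [h]

-- exhausted stack: the loop returns the best, whatever the fuel
theorem pvLoopB_nil (tree : List (Int × List (List Int))) (F : Nat) (best : List Int × Int) :
    pvLoopB tree F [] best = best := by
  cases F <;> rfl

-- height certificate: DFS from this node stops within n more levels of internal children
def pvHtOk (tree : List (Int × List (List Int))) : Nat → Int → Bool
  | 0, node => (pvIChildren tree node).isEmpty
  | n+1, node => (pvIChildren tree node).all (fun cw => pvHtOk tree n cw.1)

-- iteration count of B's loop on the subtree of a node explored to depth n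
def pvCost (tree : List (Int × List (List Int))) : Nat → Int → Nat
  | 0, _ => 1
  | n+1, k => 1 + ((pvIChildren tree k).map (fun cw => pvCost tree n cw.1)).sum

-- the last element of an extended path is the new child
theorem pvLast_append (path : List Int) (c : Int) :
    (PySem.List.pyGet? (path ++ [c]) (-1)).getD 0 = c := by
  rw [PySem.List.pyGet?_neg_one_append_singleton]; rfl

-- MAIN: with exactly pvCost fuel, one stack frame is consumed and the best is updated with
-- A's recursive answer for that frame; proved together with its fold over a frame list
theorem pvMain (tree : List (Int × List (List Int))) :
    ∀ (n : Nat) (path : List Int) (d : Int),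
    pvHtOk tree n ((PySem.List.pyGet? path (-1)).getD 0) = true →
    ∀ (rest : List (List Int × Int)) (best : List Int × Int) (G : Nat),
    pvLoopB tree (pvCost tree n ((PySem.List.pyGet? path (-1)).getD 0) + G) ((path, d) :: rest) best
    = pvLoopB tree G rest (pvPick best (pvGoA tree (n+1) path d))
  | 0, path, d => by
    intro hok rest best G
    have hemp : pvIChildren tree ((PySem.List.pyGet? path (-1)).getD 0) = [] := by
      have := hok; unfold pvHtOk at this; exact List.isEmpty_iff.mp this
    have hcost : pvCost tree 0 ((PySem.List.pyGet? path (-1)).getD 0) = 1 := rfl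
    rw [hcost, Nat.add_comm 1 G, pvLoopB_step, hemp, pvGoA_ichildren, hemp]
    rfl
  | n+1, path, d => by
    intro hok rest best G
    unfold pvHtOk at hok
    unfold pvCost
    -- inner fold over the children frames
    have inner : ∀ (cs : List (Int × Int)), (∀ cw ∈ cs, pvHtOk tree n cw.1 = true) →
        ∀ (rest : List (List Int × Int)) (b : List Int × Int) (G : Nat),
        pvLoopB tree ((cs.map (fun cw => pvCost tree n cw.1)).sum + G)
          ((cs.map (fun cw => (path ++ [cw.1], d + cw.2))) ++ rest) b
        = pvLoopB tree G rest
            (cs.foldl (fun b cw => pvPick b (pvGoA tree (n+1) (path ++ [cw.1]) (d + cw.2))) b) := by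
      intro cs
      induction cs with
      | nil => intro _ rest b G; simp
      | cons cw cs ih =>
        intro hall rest b G
        simp only [List.map_cons, List.sum_cons, List.foldl_cons, List.cons_append]
        rw [Nat.add_assoc]
        have hcw : pvHtOk tree n ((PySem.List.pyGet? (path ++ [cw.1]) (-1)).getD 0) = true := by
          rw [pvLast_append]; exact hall cw (by simp)
        have := pvMain tree n (path ++ [cw.1]) (d + cw.2) hcw
          ((cs.map (fun cw => (path ++ [cw.1], d + cw.2))) ++ rest) b
          ((cs.map (fun cw => pvCost tree n cw.1)).sum + G)
        rw [pvLast_append] at this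
        rw [this]
        exact ih (fun x hx => hall x (by simp [hx])) rest _ G
    rw [Nat.add_comm 1, Nat.add_assoc, Nat.add_comm 1 G, ← Nat.add_assoc, pvLoopB_step]
    rw [inner _ (by intro cw hcw; exact List.all_eq_true.mp hok cw hcw) rest (pvPick best (path, d)) G]
    rw [pvGoA_ichildren tree (n+1) path d]
    rw [pvFold_pick_hoist]
-- termination: structural on the first Nat argument
decreasing_by all_goals omega

-- a fold step of pvGoA keeps the state or strictly increases its depth,
-- so A's answer absorbs the root candidate
theorem pvFoldl_grow {α : Type} (f : (List Int × Int) → α → (List Int × Int))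
    (hf : ∀ s x, f s x = s ∨ (f s x).2 > s.2) :
    ∀ (l : List α) (s : List Int × Int), l.foldl f s = s ∨ (l.foldl f s).2 > s.2
  | [], s => Or.inl rfl
  | x :: l, s => by
    simp only [List.foldl_cons]
    rcases pvFoldl_grow f hf l (f s x) with h1 | h1 <;> rcases hf s x with h2 | h2
    · rw [h1, h2]; exact Or.inl rfl
    · rw [h1]; exact Or.inr h2
    · rw [h2] at h1 ⊢; exact Or.inr h1
    · right; omega

theorem pvGoA_absorb (tree : List (Int × List (List Int))) (fuel : Nat) (path : List Int) (d : Int) :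
    pvPick (path, d) (pvGoA tree fuel path d) = pvGoA tree fuel path d := by
  have key : pvGoA tree fuel path d = (path, d) ∨ (pvGoA tree fuel path d).2 > d := by
    cases fuel with
    | zero => exact Or.inl rfl
    | succ n =>
      simp only [pvGoA]
      exact pvFoldl_grow _ (by
        intro s e
        split_ifs with h1 h2
        · exact Or.inr h2
        · exact Or.inl rfl
        · exact Or.inl rfl) _ _
  rcases key with hk | hk
  · rw [hk]; exact pvPick_self _
  · unfold pvPick
    split_ifs with hif
    · rfl
    · exact absurd hk (by simpa using hif)

-- an empty (n+1)-th iterate certifies height ≤ n for every member of the set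
theorem pvIter_htOk (tree : List (Int × List (List Int))) :
    ∀ (n : Nat) (s : List Int), pvIter tree (n+1) s = [] → ∀ k ∈ s, pvHtOk tree n k = true := by
  intro n
  induction n with
  | zero =>
    intro s h k hk
    have hstep : pvStep tree s = [] := h
    unfold pvHtOk
    rw [List.isEmpty_iff]
    have := (List.flatMap_eq_nil_iff).mp hstep _ hk
    exact List.map_eq_nil_iff.mp this
  | succ n ih =>
    intro s h k hk
    unfold pvHtOk
    rw [List.all_eq_true]
    intro cw hcw
    refine ih (pvStep tree s) h cw.1 ?_
    unfold pvStep
    rw [List.mem_flatMap]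
    exact ⟨k, hk, List.mem_map.mpr ⟨cw, hcw, rfl⟩⟩

-- every value stored in the association list is bounded by the total edge count
theorem pvLookup_len_le (tree : List (Int × List (List Int))) (k : Int) :
    ((List.lookup k tree).getD []).length ≤ (tree.map (fun p => p.2.length)).sum := by
  induction tree with
  | nil => simp
  | cons p tree ih =>
    simp only [List.lookup, List.map_cons, List.sum_cons]
    by_cases h : k == p.1
    · simp only [h, Option.getD_some]; omega
    · simp only [h]; omega

theorem pvFilterMap_len_le {α β : Type} (f : α → Option β) :
    ∀ l : List α, (l.filterMap f).length ≤ l.length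
  | [] => Nat.le_refl 0
  | a :: l => by
    rw [List.filterMap_cons]
    cases f a with
    | none => exact Nat.le_succ_of_le (pvFilterMap_len_le f l)
    | some b => simpa using Nat.succ_le_succ (pvFilterMap_len_le f l)

theorem pvICh_len_le (tree : List (Int × List (List Int))) (k : Int) :
    (pvIChildren tree k).length ≤ (tree.map (fun p => p.2.length)).sum := by
  unfold pvIChildren
  exact Nat.le_trans (pvFilterMap_len_le _ _) (pvLookup_len_le tree k)

theorem pvSumNat_le (m : Nat) :
    ∀ l : List Nat, (∀ x ∈ l, x ≤ m) → l.sum ≤ l.length * m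
  | [], _ => by simp
  | a :: l, h => by
    simp only [List.sum_cons, List.length_cons, Nat.succ_mul]
    have h1 := h a (by simp)
    have h2 := pvSumNat_le m l (fun x hx => h x (by simp [hx]))
    omega

-- the cost of exploring to depth n is at most (E+2)^(n+1)
theorem pvCost_le (tree : List (Int × List (List Int))) :
    ∀ (n : Nat) (k : Int), pvCost tree n k ≤ ((tree.map (fun p => p.2.length)).sum + 2) ^ (n+1) := by
  intro n
  induction n with
  | zero =>
    intro k
    exact Nat.one_le_pow _ _ (by omega)
  | succ n ih =>
    intro k
    unfold pvCost
    set E := (tree.map (fun p => p.2.length)).sum with hE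
    have hsum : ((pvIChildren tree k).map (fun cw => pvCost tree n cw.1)).sum
        ≤ ((pvIChildren tree k).map (fun cw => pvCost tree n cw.1)).length * (E + 2) ^ (n+1) := by
      refine pvSumNat_le _ _ ?_
      intro x hx
      rw [List.mem_map] at hx
      obtain ⟨cw, _, rfl⟩ := hx
      exact ih cw.1
    rw [List.length_map] at hsum
    have hlen : (pvIChildren tree k).length ≤ E := pvICh_len_le tree k
    have hpow : 1 ≤ (E + 2) ^ (n+1) := Nat.one_le_pow _ _ (by omega)
    calc 1 + ((pvIChildren tree k).map (fun cw => pvCost tree n cw.1)).sum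
        ≤ 1 + E * (E + 2) ^ (n+1) := by
          have := Nat.mul_le_mul_right ((E + 2) ^ (n+1)) hlen
          omega
      _ ≤ (E + 2) ^ (n+1) * (E + 2) := by nlinarith
      _ = (E + 2) ^ (n+1+1) := (pow_succ _ _).symm

-- ===== VERDICT (by name: the statement is the Claim_ definition above) =====
theorem FindDeepestInternalNode_spec : Claim_equal_FindDeepestInternalNode := by
  intro tree path d _ hpre
  obtain ⟨-, -, hiter, -⟩ := hpre
  unfold Spec_FindDeepestInternalNode FindDeepestInternalNode FindDeepestInternalNode_alt
  set start := (PySem.List.pyGet? path (-1)).getD 0 with hstart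
  have hok : pvHtOk tree tree.length start = true :=
    pvIter_htOk tree tree.length [start] hiter start (by simp)
  have hcost : pvCost tree tree.length start ≤ pvFuelB tree := by
    unfold pvFuelB
    exact le_trans (pvCost_le tree tree.length start)
      (Nat.pow_le_pow_right (by omega) (by omega))
  have hsplit : pvFuelB tree = pvCost tree tree.length start + (pvFuelB tree - pvCost tree tree.length start) :=
    (Nat.add_sub_cancel' hcost).symm
  rw [hsplit, pvMain tree tree.length path d hok [] (path, d) _, pvLoopB_nil, pvGoA_absorb]
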